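-- pv_equiv track=rewrite | github.com/ozroc/fdict | fdict/fdict.py | _get_all_parent_nodes_nested
-- ===== SOURCE A (Python) =====
-- def _get_all_parent_nodes_nested(path, delimiter='/'):
--     '''Get path to all parent nodes for current leaf, starting from root down to leaf's direct parent, and return only the relative key (not the fullkey)'''
--     pos = path.find(delimiter)
--     i = 0
--     lastpos = 0
--     while pos != -1:
--         yield path[lastpos:pos]
--         lastpos = pos+1
--         pos = path.find(delimiter, pos+1)
-- ===== SOURCE B (Python) =====
-- def _get_all_parent_nodes_nested(path, delimiter='/'):
--     '''Get path to all parent nodes for current leaf, starting from root down to leaf's direct parent, and return only the relative key (not the fullkey)'''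
--     cuts = [i for i in range(len(path) + 1) if path.startswith(delimiter, i)]
--     for prev, cut in zip([-1] + cuts, cuts):
--         yield path[prev + 1:cut]
-- ===== Notes on version B (the rewrite author's own statement) =====
-- stated objective: alternative
-- what changed: Replaces A's stateful scan (lastpos/pos index state machine with repeated str.find calls) by materializing the full list of delimiter match positions with one comprehension and then slicing between consecutive positions via zip.
import Mathlib
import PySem

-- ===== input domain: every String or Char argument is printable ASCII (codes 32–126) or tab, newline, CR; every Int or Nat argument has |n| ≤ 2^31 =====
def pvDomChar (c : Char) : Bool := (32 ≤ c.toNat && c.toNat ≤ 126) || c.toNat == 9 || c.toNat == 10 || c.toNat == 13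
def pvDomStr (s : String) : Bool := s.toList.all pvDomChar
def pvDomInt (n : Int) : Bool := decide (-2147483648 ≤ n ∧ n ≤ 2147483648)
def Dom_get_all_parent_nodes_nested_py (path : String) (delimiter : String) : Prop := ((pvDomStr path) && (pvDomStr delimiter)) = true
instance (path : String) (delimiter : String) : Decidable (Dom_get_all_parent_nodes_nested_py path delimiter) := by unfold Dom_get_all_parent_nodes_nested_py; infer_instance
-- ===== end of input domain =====

-- B replaces A's stateful lastpos/pos find-loop by materializing the list of all delimiter match
-- positions once and slicing between consecutive positions (objective: alternative decomposition).

-- ===== PORT A =====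
-- while pos != -1: yield path[lastpos:pos]; lastpos = pos+1; pos = path.find(delimiter, pos+1)
-- (fuel only makes the recursion total: the loop runs at most len(path)+1 times)
def pvAloop (path : String) (delimiter : String) (fuel : Nat) (lastpos : Int) (pos : Int)
    (acc : List String) : List String :=
  match fuel with
  | 0 => acc
  | f+1 =>
    if pos = -1 then acc
    else pvAloop path delimiter f (pos+1) (PySem.Str.findFrom path delimiter (pos+1))
      (acc ++ [PySem.Str.slice path (some lastpos) (some pos)])

def get_all_parent_nodes_nested_py (path : String) (delimiter : String) : List String :=
  pvAloop path delimiter (path.toList.length + 2) 0 (PySem.Str.find path delimiter) []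

-- ===== PORT B =====
-- cuts = [i for i in range(len(path)+1) if path.startswith(delimiter, i)]
-- (path.startswith(delimiter, i) for 0 ≤ i ≤ len(path) is exactly: delimiter is a prefix of
-- path[i:]; ported as PySem.Chars.startswith on the dropped character list, which is exact there)
-- for prev, cut in zip([-1] + cuts, cuts): yield path[prev+1:cut]
def get_all_parent_nodes_nested_py_alt (path : String) (delimiter : String) : List String :=
  let cuts := (List.range (path.toList.length + 1)).filter
    (fun i => PySem.Chars.startswith (path.toList.drop i) delimiter.toList)
  (List.zip ((-1 : Int) :: cuts.map (fun c => (c : Int))) (cuts.map (fun c => (c : Int)))).map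
    (fun pc => PySem.Str.slice path (some (pc.1 + 1)) (some pc.2))

-- ===== PRECONDITION & SPEC =====
def Spec_get_all_parent_nodes_nested_py (path : String) (delimiter : String) (out : List String) : Prop := out = get_all_parent_nodes_nested_py_alt path delimiter
instance (path : String) (delimiter : String) (out : List String) : Decidable (Spec_get_all_parent_nodes_nested_py path delimiter out) := by unfold Spec_get_all_parent_nodes_nested_py; infer_instance

-- ===== CLAIM (what is proved, stated in full; the proofs are below) =====
def Claim_equal_get_all_parent_nodes_nested_py : Prop := ∀ (path : String) (delimiter : String), Dom_get_all_parent_nodes_nested_py path delimiter → Spec_get_all_parent_nodes_nested_py path delimiter (get_all_parent_nodes_nested_py path delimiter)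

-- ===== LEMMAS AND PROOFS =====

-- Recursive normal form of B's zip-of-consecutive-cuts pass.
def pvBB (path : String) : List Nat → Int → List String
  | [], _ => []
  | c :: rest, prev =>
    PySem.Str.slice path (some (prev + 1)) (some (c : Int)) :: pvBB path rest (c : Int)

lemma pvZip_eq_pvBB (path : String) :
    ∀ (cs : List Nat) (prev : Int),
      (List.zip (prev :: cs.map (fun c => (c : Int))) (cs.map (fun c => (c : Int)))).map
          (fun pc => PySem.Str.slice path (some (pc.1 + 1)) (some pc.2))
        = pvBB path cs prev := by
  intro cs
  induction cs with
  | nil => intro prev; simp [pvBB]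
  | cons c rest ih => intro prev; simp [pvBB, List.zip, ← ih c]

lemma pvOcc_lt_length (s d : List Char) (hd : d ≠ []) (i : Nat) (h : d <+: s.drop i) :
    i < s.length := by
  by_contra hge
  rw [not_lt] at hge
  rw [List.drop_eq_nil_iff.mpr hge] at h
  exact hd (List.prefix_nil.mp h)

-- CPython keeps find(sub, start) = -1 for start past len(s), even for sub = ''.
lemma pvFindFrom_past (s sub : List Char) :
    PySem.Chars.findFrom s sub ((s.length : Int) + 1) none = -1 := by
  simp only [PySem.Chars.findFrom]
  split_ifs <;> omega

-- The sorted list of cut positions, peeled at its least element ≥ the current scan start.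
lemma pvSorted_filter_peel (xs : List Nat) (hs : xs.Pairwise (· < ·)) (m : Nat) (hm : m ∈ xs) :
    xs.filter (fun i => m ≤ i) = m :: xs.filter (fun i => m + 1 ≤ i) := by
  induction xs with
  | nil => simp at hm
  | cons x t ih =>
    rw [List.pairwise_cons] at hs
    rcases List.mem_cons.mp hm with hx | hxt
    · subst hx
      rw [List.filter_cons, List.filter_cons, if_pos (by simp), if_neg (by simp)]
      congr 1
      apply List.filter_congr
      intro i hi
      have := hs.1 i hi
      simp only [decide_eq_decide]
      omega
    · have hxm : x < m := hs.1 m hxt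
      rw [List.filter_cons, List.filter_cons,
        if_neg (by simp; omega), if_neg (by simp; omega)]
      exact ih hs.2 hxt

lemma pvCuts_mem (path delimiter : String) (i : Nat) :
    i ∈ (List.range (path.toList.length + 1)).filter
        (fun i => PySem.Chars.startswith (path.toList.drop i) delimiter.toList)
      ↔ i ≤ path.toList.length ∧ delimiter.toList <+: path.toList.drop i := by
  simp [List.mem_filter, List.mem_range, PySem.Chars.startswith_iff]

lemma pvCuts_sorted (path delimiter : String) :
    ((List.range (path.toList.length + 1)).filter
        (fun i => PySem.Chars.startswith (path.toList.drop i) delimiter.toList)).Pairwise (· < ·) :=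
  (List.pairwise_lt_range).filter _

lemma pvAloop_eq_pvBB (path delimiter : String) :
    ∀ (f k : Nat) (acc : List String), k ≤ path.toList.length → path.toList.length - k < f →
      pvAloop path delimiter f (k : Int) (PySem.Str.findFrom path delimiter (k : Int)) acc
        = acc ++ pvBB path
            (((List.range (path.toList.length + 1)).filter
              (fun i => PySem.Chars.startswith (path.toList.drop i) delimiter.toList)).filter
              (fun i => k ≤ i))
            ((k : Int) - 1) := by
  intro f
  induction f with
  | zero => intro k acc hk hf; omega
  | succ f ih =>
    intro k acc hk hf
    rw [PySem.Str.findFrom_eq, PySem.Chars.findFrom_natCast path.toList delimiter.toList k hk]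
    by_cases hfind : PySem.Chars.find (path.toList.drop k) delimiter.toList = -1
    · rw [if_pos hfind]
      rw [show pvAloop path delimiter (f+1) (k : Int) (-1) acc = acc from by simp [pvAloop]]
      rw [List.filter_eq_nil_iff.mpr ?empt]
      · simp [pvBB]
      case empt =>
        intro i hi
        obtain ⟨hile, hocc⟩ := (pvCuts_mem path delimiter i).mp hi
        simp only [decide_eq_true_eq]
        intro hki
        rw [show path.toList.drop i = (path.toList.drop k).drop (i - k) from by
          rw [List.drop_drop]; congr 1; omega] at hocc
        have : 0 ≤ PySem.Chars.find (path.toList.drop k) delimiter.toList :=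
          (PySem.Chars.find_nonneg_iff _ _).mpr
            ((PySem.Chars.isIn_iff_infix _ _).mp
              ((PySem.Chars.exists_prefix_drop_iff_isIn _ _).mp ⟨i - k, hocc⟩))
        omega
    · rw [if_neg hfind]
      have h0 : 0 ≤ PySem.Chars.find (path.toList.drop k) delimiter.toList := by
        have := PySem.Chars.neg_one_le_find (path.toList.drop k) delimiter.toList; omega
      obtain ⟨hp, hmin⟩ := PySem.Chars.find_spec h0
      set n := (PySem.Chars.find (path.toList.drop k) delimiter.toList).toNat with hn
      have hfr' : PySem.Chars.find (path.toList.drop k) delimiter.toList = (n : Int) := by omega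
      have hob : delimiter.toList <+: path.toList.drop (k + n) := by
        rwa [List.drop_drop] at hp
      have hknle : k + n ≤ path.toList.length := by
        by_cases hdnil : delimiter.toList = []
        · have : PySem.Chars.find (path.toList.drop k) delimiter.toList = 0 := by
            rw [hdnil]; exact PySem.Chars.find_nil _
          omega
        · have := pvOcc_lt_length path.toList delimiter.toList hdnil (k + n) hob
          omega
      have hcong : (((List.range (path.toList.length + 1)).filter
              (fun i => PySem.Chars.startswith (path.toList.drop i) delimiter.toList)).filter
              (fun i => k ≤ i))
          = (((List.range (path.toList.length + 1)).filter
              (fun i => PySem.Chars.startswith (path.toList.drop i) delimiter.toList)).filter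
              (fun i => k + n ≤ i)) := by
        apply List.filter_congr
        intro i hi
        obtain ⟨hile, hocc⟩ := (pvCuts_mem path delimiter i).mp hi
        simp only [decide_eq_decide]
        constructor
        · intro hki
          by_contra hlt
          rw [show path.toList.drop i = (path.toList.drop k).drop (i - k) from by
            rw [List.drop_drop]; congr 1; omega] at hocc
          exact hmin (i - k) (by omega) hocc
        · intro h; omega
      have hpeel : (((List.range (path.toList.length + 1)).filter
              (fun i => PySem.Chars.startswith (path.toList.drop i) delimiter.toList)).filter
              (fun i => k + n ≤ i))
          = (k + n) :: (((List.range (path.toList.length + 1)).filter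
              (fun i => PySem.Chars.startswith (path.toList.drop i) delimiter.toList)).filter
              (fun i => k + n + 1 ≤ i)) :=
        pvSorted_filter_peel _ (pvCuts_sorted path delimiter) (k + n)
          ((pvCuts_mem path delimiter (k + n)).mpr ⟨hknle, hob⟩)
      rw [hcong, hpeel]
      have hstep : pvAloop path delimiter (f+1) (k : Int)
            ((k : Int) + PySem.Chars.find (path.toList.drop k) delimiter.toList) acc
          = pvAloop path delimiter f
              ((k : Int) + PySem.Chars.find (path.toList.drop k) delimiter.toList + 1)
              (PySem.Str.findFrom path delimiter
                ((k : Int) + PySem.Chars.find (path.toList.drop k) delimiter.toList + 1))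
              (acc ++ [PySem.Str.slice path (some (k : Int))
                (some ((k : Int) + PySem.Chars.find (path.toList.drop k) delimiter.toList))]) := by
        rw [show pvAloop path delimiter (f+1) (k : Int)
              ((k : Int) + PySem.Chars.find (path.toList.drop k) delimiter.toList) acc
            = if ((k : Int) + PySem.Chars.find (path.toList.drop k) delimiter.toList) = -1 then acc
              else pvAloop path delimiter f
                ((k : Int) + PySem.Chars.find (path.toList.drop k) delimiter.toList + 1)
                (PySem.Str.findFrom path delimiter
                  ((k : Int) + PySem.Chars.find (path.toList.drop k) delimiter.toList + 1))
                (acc ++ [PySem.Str.slice path (some (k : Int))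
                  (some ((k : Int) + PySem.Chars.find (path.toList.drop k) delimiter.toList))])
            from rfl]
        rw [if_neg (by rw [hfr']; omega)]
      rw [hstep]
      by_cases hkn1 : k + n + 1 ≤ path.toList.length
      · rw [show (k : Int) + PySem.Chars.find (path.toList.drop k) delimiter.toList + 1
            = ((k + n + 1 : Nat) : Int) from by rw [hfr']; push_cast; ring]
        rw [ih (k + n + 1) _ hkn1 (by omega)]
        rw [show pvBB path
              ((k + n) :: (((List.range (path.toList.length + 1)).filter
                (fun i => PySem.Chars.startswith (path.toList.drop i) delimiter.toList)).filter
                (fun i => k + n + 1 ≤ i))) ((k : Int) - 1)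
            = PySem.Str.slice path (some ((k : Int) - 1 + 1)) (some ((k + n : Nat) : Int)) ::
              pvBB path (((List.range (path.toList.length + 1)).filter
                (fun i => PySem.Chars.startswith (path.toList.drop i) delimiter.toList)).filter
                (fun i => k + n + 1 ≤ i)) ((k + n : Nat) : Int) from rfl]
        rw [show ((k : Int) - 1 + 1) = (k : Int) from by ring,
          show ((k + n + 1 : Nat) : Int) - 1 = ((k + n : Nat) : Int) from by push_cast; ring,
          show ((k + n : Nat) : Int) = (k : Int) + PySem.Chars.find (path.toList.drop k) delimiter.toList
            from by rw [hfr']; push_cast; ring]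
        simp
      · have hkneq : k + n = path.toList.length := by omega
        have hpast : PySem.Str.findFrom path delimiter
            ((k : Int) + PySem.Chars.find (path.toList.drop k) delimiter.toList + 1) = -1 := by
          rw [PySem.Str.findFrom_eq, hfr',
            show (k : Int) + (n : Int) + 1 = ((path.toList.length : Int) + 1) from by
              push_cast [← hkneq]; ring]
          exact pvFindFrom_past path.toList delimiter.toList
        rw [hpast]
        rw [show ∀ (acc' : List String), pvAloop path delimiter f
              ((k : Int) + PySem.Chars.find (path.toList.drop k) delimiter.toList + 1) (-1) acc'
            = acc' from by intro acc'; cases f <;> simp [pvAloop]]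
        rw [List.filter_eq_nil_iff.mpr ?past]
        · rw [show pvBB path [k + n] ((k : Int) - 1)
              = [PySem.Str.slice path (some ((k : Int) - 1 + 1)) (some ((k + n : Nat) : Int))]
              from rfl]
          rw [show ((k : Int) - 1 + 1) = (k : Int) from by ring,
            show ((k + n : Nat) : Int) = (k : Int) + PySem.Chars.find (path.toList.drop k) delimiter.toList
              from by rw [hfr']; push_cast; ring]
        case past =>
          intro i hi
          obtain ⟨hile, _⟩ := (pvCuts_mem path delimiter i).mp hi
          simp only [decide_eq_true_eq]
          omega

-- ===== VERDICT (by name: the statement is the Claim_ definition above) =====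
theorem get_all_parent_nodes_nested_py_spec : Claim_equal_get_all_parent_nodes_nested_py := by
  intro path delimiter _
  show get_all_parent_nodes_nested_py path delimiter
      = get_all_parent_nodes_nested_py_alt path delimiter
  unfold get_all_parent_nodes_nested_py get_all_parent_nodes_nested_py_alt
  rw [pvZip_eq_pvBB]
  rw [show PySem.Str.find path delimiter
      = PySem.Str.findFrom path delimiter 0 from by
    rw [PySem.Str.findFrom_eq, PySem.Str.find_eq]
    norm_num [PySem.Chars.findFrom_zero]]
  rw [show (0 : Int) = ((0 : Nat) : Int) from by norm_num]
  rw [pvAloop_eq_pvBB path delimiter (path.toList.length + 2) 0 [] (by omega) (by omega)]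
  rw [show (((List.range (path.toList.length + 1)).filter
      (fun i => PySem.Chars.startswith (path.toList.drop i) delimiter.toList)).filter
      (fun i => 0 ≤ i))
    = ((List.range (path.toList.length + 1)).filter
      (fun i => PySem.Chars.startswith (path.toList.drop i) delimiter.toList)) from by
    apply List.filter_eq_self.mpr; intro a _; simp]
  norm_num
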